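-- pv_equiv track=rewrite | github.com/bjuice1/it-diligence-agent | tools_v2/deterministic_parser.py | join_multiline_cells
-- ===== SOURCE A (Python) =====
-- from typing import List, Dict, Any, Optional, Tuple
--
-- def join_multiline_cells(rows: List[Dict]) -> List[Dict]:
--     """
--     Join rows where first column is empty (likely continuation).
--
--     Heuristic: If first column empty but others have content, append to previous row.
--
--     Args:
--         rows: Parsed table rows
--
--     Returns:
--         Rows with multi-line cells joined
--     """
--     if not rows:
--         return rows
--
--     first_col = list(rows[0].keys())[0]  # Assume first column is key column
--     joined_rows = []
--     current_row = None
--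
--     for row in rows:
--         # If first column empty, likely continuation
--         if not row.get(first_col, '').strip():
--             if current_row:
--                 # Append to previous row
--                 for key, value in row.items():
--                     if value.strip():
--                         current_row[key] = current_row.get(key, '') + ' ' + value
--         else:
--             # New row
--             if current_row:
--                 joined_rows.append(current_row)
--             current_row = row.copy()
--
--     # Add last row
--     if current_row:
--         joined_rows.append(current_row)
--
--     return joined_rows
-- ===== SOURCE B (Python) =====
-- from typing import List, Dict
--
-- def join_multiline_cells(rows: List[Dict]) -> List[Dict]:
--     """Two passes: group rows at each non-empty first column, then fold each
--     group's continuation rows into a copy of its head row."""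
--     if not rows:
--         return rows
--
--     key = list(rows[0].keys())[0]
--     groups = []
--     for row in rows:
--         if row.get(key, '').strip():
--             groups.append([row])
--         elif groups:
--             groups[-1].append(row)
--
--     result = []
--     for head, *conts in groups:
--         current = head.copy()
--         for row in conts:
--             for k, v in row.items():
--                 if v.strip():
--                     current[k] = current.get(k, '') + ' ' + v
--         result.append(current)
--     return result
-- ===== Notes on version B (the rewrite author's own statement) =====
-- stated objective: alternative
-- what changed: Replaces A's single streaming pass with an Option current-row accumulator by two passes: first partition the rows into groups started at each non-empty first-column row (dropping leading continuations), then fold each group's continuation rows into a copy of its head.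
import Mathlib
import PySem

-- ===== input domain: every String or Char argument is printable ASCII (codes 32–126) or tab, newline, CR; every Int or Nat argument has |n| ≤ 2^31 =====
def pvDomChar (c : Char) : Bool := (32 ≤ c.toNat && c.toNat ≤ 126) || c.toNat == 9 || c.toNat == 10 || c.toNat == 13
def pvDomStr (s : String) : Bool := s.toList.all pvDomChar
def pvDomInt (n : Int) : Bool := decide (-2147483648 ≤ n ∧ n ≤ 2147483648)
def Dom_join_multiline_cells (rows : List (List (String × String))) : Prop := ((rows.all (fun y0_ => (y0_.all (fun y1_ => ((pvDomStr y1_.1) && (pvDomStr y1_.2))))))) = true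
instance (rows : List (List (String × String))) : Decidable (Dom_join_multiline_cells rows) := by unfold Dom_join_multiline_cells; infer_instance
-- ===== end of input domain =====

-- B replaces A's one streaming pass holding an Option current-row by two passes (group, then reduce each group); equal return value, neither mutates its input.

-- shared inner merge loop ('for key, value in row.items(): if value.strip(): current[key] = current.get(key,"") + " " + value'),
-- identical in both Pythons
def pvMerge (c : PySem.Dict String String) (row : List (String × String)) : PySem.Dict String String :=
  row.foldl (fun c kv =>
    if PySem.Str.strip kv.2 == "" then c
    else c.insert kv.1 (PySem.Dict.getD c kv.1 "" ++ " " ++ kv.2)) c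

-- ===== PORT A =====
-- loop body of A ('for row in rows: …'); state = (joined_rows, current_row)
def pvStepA (key : String)
    (st : List (List (String × String)) × Option (PySem.Dict String String))
    (row : List (String × String)) :
    List (List (String × String)) × Option (PySem.Dict String String) :=
  if PySem.Str.strip (PySem.Dict.getD (PySem.Dict.mk row) key "") == "" then
    match st.2 with
    | some c => if c.items.isEmpty then st else (st.1, some (pvMerge c row))
    | none => st
  else
    match st.2 with
    | some c => ((if c.items.isEmpty then st.1 else st.1 ++ [c.items]), some (PySem.Dict.mk row))
    | none => (st.1, some (PySem.Dict.mk row))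

-- trailing 'if current_row: joined_rows.append(current_row)'
def pvFlushA (cur : Option (PySem.Dict String String)) : List (List (String × String)) :=
  match cur with
  | some c => if c.items.isEmpty then [] else [c.items]
  | none => []

def join_multiline_cells (rows : List (List (String × String))) : List (List (String × String)) :=
  match rows with
  | [] => rows
  | h :: _ =>
    -- list(rows[0].keys())[0]; Python raises IndexError when rows[0] is empty, excluded by Pre_
    let first_col := PySem.List.pyGetD (PySem.Dict.keys (PySem.Dict.mk h)) 0 ""
    let st := rows.foldl (pvStepA first_col) ([], none)
    st.1 ++ pvFlushA st.2

-- ===== PORT B =====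
-- 'groups[-1].append(row)'
def pvAppendLast (gs : List (List (List (String × String)))) (row : List (String × String)) :
    List (List (List (String × String))) :=
  match gs with
  | [] => []
  | [g] => [g ++ [row]]
  | g :: rest => g :: pvAppendLast rest row

-- loop body of B's first pass
def pvStepB (key : String) (gs : List (List (List (String × String))))
    (row : List (String × String)) : List (List (List (String × String))) :=
  if PySem.Str.strip (PySem.Dict.getD (PySem.Dict.mk row) key "") != "" then gs ++ [[row]]
  else if gs.isEmpty then gs
  else pvAppendLast gs row

-- B's second pass: 'current = head.copy(); for row in conts: <merge loop>' (the [] arm is unreachable: groups hold nonempty lists)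
def pvReduce (g : List (List (String × String))) : List (String × String) :=
  match g with
  | [] => []
  | hd :: conts => (conts.foldl pvMerge (PySem.Dict.mk hd)).items

def join_multiline_cells_alt (rows : List (List (String × String))) : List (List (String × String)) :=
  match rows with
  | [] => rows
  | h :: _ =>
    let key := PySem.List.pyGetD (PySem.Dict.keys (PySem.Dict.mk h)) 0 ""
    let groups := rows.foldl (pvStepB key) []
    groups.map pvReduce

-- ===== PRECONDITION & SPEC =====
-- Pre_ excludes only nonempty inputs whose FIRST row is an empty dict: there 'list(rows[0].keys())[0]' raises IndexError in both Pythons.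
def Pre_join_multiline_cells (rows : List (List (String × String))) : Prop :=
  rows.head? ≠ some []
instance (rows : List (List (String × String))) : Decidable (Pre_join_multiline_cells rows) := by unfold Pre_join_multiline_cells; infer_instance

def pvWitness_join_multiline_cells : (List (List (String × String))) :=
  [[("id", "1"), ("note", "a")], [("id", "  "), ("note", "b")]]

def Spec_join_multiline_cells (rows : List (List (String × String))) (out : List (List (String × String))) : Prop := out = join_multiline_cells_alt rows
instance (rows : List (List (String × String))) (out : List (List (String × String))) : Decidable (Spec_join_multiline_cells rows out) := by unfold Spec_join_multiline_cells; infer_instance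

-- ===== CLAIM (what is proved, stated in full; the proofs are below) =====
def Claim_equal_join_multiline_cells : Prop := ∀ (rows : List (List (String × String))), Dom_join_multiline_cells rows → Pre_join_multiline_cells rows → Spec_join_multiline_cells rows (join_multiline_cells rows)

-- ===== LEMMAS AND PROOFS =====

-- common middle form of both loops: the rest of the rows processed against an open current row
def pvSpine (key : String) : List (List (String × String)) → Option (PySem.Dict String String) → List (List (String × String))
  | [], cur => (match cur with | some c => [c.items] | none => [])
  | r :: rs, cur =>
    if PySem.Str.strip (PySem.Dict.getD (PySem.Dict.mk r) key "") == "" then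
      (match cur with
       | some c => pvSpine key rs (some (pvMerge c r))
       | none => pvSpine key rs none)
    else
      (match cur with | some c => [c.items] | none => []) ++ pvSpine key rs (some (PySem.Dict.mk r))

theorem pvMerge_ne_nil (row : List (String × String)) (c : PySem.Dict String String)
    (h : c.items ≠ []) : (pvMerge c row).items ≠ [] := by
  induction row generalizing c with
  | nil => exact h
  | cons kv rest ih =>
    simp only [pvMerge, List.foldl_cons] at *
    split
    · exact ih c h
    · apply ih
      rw [PySem.Dict.items_insert]
      split
      · simpa using h
      · simp

theorem pvRow_ne_nil (key : String) (r : List (String × String))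
    (h : ¬ (PySem.Str.strip (PySem.Dict.getD (PySem.Dict.mk r) key "") == "") = true) : r ≠ [] := by
  intro hr; subst hr
  exact h (by rw [show PySem.Dict.mk ([] : List (String × String)) = PySem.Dict.empty from rfl,
    PySem.Dict.getD_empty]; decide)

theorem pvA_loop (key : String) (rows : List (List (String × String))) :
    ∀ (acc : List (List (String × String))) (cur : Option (PySem.Dict String String)),
    (∀ c, cur = some c → c.items ≠ []) →
    (rows.foldl (pvStepA key) (acc, cur)).1 ++ pvFlushA (rows.foldl (pvStepA key) (acc, cur)).2
      = acc ++ pvSpine key rows cur := by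
  induction rows with
  | nil =>
    intro acc cur hcur
    cases cur with
    | none => simp [pvFlushA, pvSpine]
    | some c =>
      have h1 : c.items.isEmpty = false := by simp [hcur c rfl]
      simp [pvFlushA, pvSpine, h1]
  | cons r rs ih =>
    intro acc cur hcur
    simp only [List.foldl_cons, pvSpine]
    by_cases hb : (PySem.Str.strip (PySem.Dict.getD (PySem.Dict.mk r) key "") == "") = true
    · simp only [pvStepA, hb, if_pos]
      cases cur with
      | none => simpa using ih acc none (by simp)
      | some c =>
        have hc := hcur c rfl
        have h1 : c.items.isEmpty = false := by simp [hc]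
        simp only [h1, Bool.false_eq_true, if_false]
        simpa [hc] using ih acc (some (pvMerge c r)) (by
          intro c' hc'; cases hc'; exact pvMerge_ne_nil r c hc)
    · simp only [pvStepA, hb]
      have hr : r ≠ [] := pvRow_ne_nil key r hb
      have hmk : ∀ c', some (PySem.Dict.mk r) = some c' → c'.items ≠ [] := by
        intro c' h'; cases h'; simpa [PySem.Dict.items] using hr
      cases cur with
      | none => simpa [hb] using ih acc (some (PySem.Dict.mk r)) hmk
      | some c =>
        have hc := hcur c rfl
        have h1 : c.items.isEmpty = false := by simp [hc]
        simp only [h1, Bool.false_eq_true, if_false]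
        rw [ih (acc ++ [c.items]) (some (PySem.Dict.mk r)) hmk]
        simp

theorem pvAppendLast_cons (a : List (List (String × String))) (l : List (List (List (String × String))))
    (r : List (String × String)) (h : l ≠ []) :
    pvAppendLast (a :: l) r = a :: pvAppendLast l r := by
  cases l with
  | nil => exact absurd rfl h
  | cons b t => rfl

theorem pvAppendLast_snoc (gs : List (List (List (String × String))))
    (g : List (List (String × String))) (r : List (String × String)) :
    pvAppendLast (gs ++ [g]) r = gs ++ [g ++ [r]] := by
  induction gs with
  | nil => rfl
  | cons a t ih =>
    rw [List.cons_append, pvAppendLast_cons a (t ++ [g]) r (by simp), ih, List.cons_append]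

theorem pvB_loop (key : String) (rows : List (List (String × String))) :
    ∀ (gsc : List (List (List (String × String)))) (hd : List (String × String))
      (conts : List (List (String × String))),
    ((rows.foldl (pvStepB key) (gsc ++ [hd :: conts])).map pvReduce)
      = gsc.map pvReduce ++ pvSpine key rows (some (conts.foldl pvMerge (PySem.Dict.mk hd))) := by
  induction rows with
  | nil =>
    intro gsc hd conts
    simp [pvSpine, pvReduce]
  | cons r rs ih =>
    intro gsc hd conts
    simp only [List.foldl_cons, pvSpine]
    by_cases hb : (PySem.Str.strip (PySem.Dict.getD (PySem.Dict.mk r) key "") == "") = true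
    · have hbne : (PySem.Str.strip (PySem.Dict.getD (PySem.Dict.mk r) key "") != "") = false := by
        simp [bne, hb]
      simp only [pvStepB, hbne, if_false, List.isEmpty_iff, List.append_eq_nil_iff,
        List.cons_ne_nil, and_false]
      have : pvAppendLast (gsc ++ [hd :: conts]) r = gsc ++ [hd :: (conts ++ [r])] := by
        simpa using pvAppendLast_snoc gsc (hd :: conts) r
      rw [if_neg (by simp), this, ih gsc hd (conts ++ [r])]
      simp [hb, List.foldl_append]
    · have hbne : (PySem.Str.strip (PySem.Dict.getD (PySem.Dict.mk r) key "") != "") = true := by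
        simp [bne, hb]
      simp only [pvStepB, hbne, if_true]
      rw [show (gsc ++ [hd :: conts]) ++ [[r]] = (gsc ++ [hd :: conts]) ++ [r :: []] from rfl,
        ih (gsc ++ [hd :: conts]) r []]
      simp [hb, pvReduce]
theorem pvB_loop0 (key : String) (rows : List (List (String × String))) :
    ((rows.foldl (pvStepB key) []).map pvReduce) = pvSpine key rows none := by
  induction rows with
  | nil => rfl
  | cons r rs ih =>
    simp only [List.foldl_cons, pvSpine]
    by_cases hb : (PySem.Str.strip (PySem.Dict.getD (PySem.Dict.mk r) key "") == "") = true
    · have hbne : (PySem.Str.strip (PySem.Dict.getD (PySem.Dict.mk r) key "") != "") = false := by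
        simp [bne, hb]
      simp only [pvStepB, hbne, List.isEmpty_nil, hb, if_pos]
      exact ih
    · have hbne : (PySem.Str.strip (PySem.Dict.getD (PySem.Dict.mk r) key "") != "") = true := by
        simp [bne, hb]
      simp only [pvStepB, hbne, if_true, List.nil_append, hb]
      rw [show ([[r]] : List (List (List (String × String)))) = [] ++ [r :: []] from rfl,
        pvB_loop key rs [] r []]
      simp

-- ===== VERDICT (by name: the statement is the Claim_ definition above) =====
theorem join_multiline_cells_spec : Claim_equal_join_multiline_cells := by
  intro rows _ _
  unfold Spec_join_multiline_cells
  cases rows with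
  | nil => rfl
  | cons h t =>
    simp only [join_multiline_cells, join_multiline_cells_alt]
    rw [pvB_loop0, pvA_loop _ _ [] none (by simp), List.nil_append]
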